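-- pv_equiv track=rewrite | github.com/IwannabeSplendid/Yandex | Manhattan Routes.py | printCoor
-- ===== SOURCE A (Python) =====
-- def printCoor(u,d,r,l):
--     coordin = []
--     for _ in range(d-u+1):
--         rTemp = r
--         for _ in range(r-l+1):
--             cUp = [(u + rTemp) // 2, (rTemp - u) // 2]
--             if ((u + rTemp) % 2 == 0):
--                 coordin.append(cUp)
--             rTemp -= 1
--         u += 1
--     return coordin
-- ===== SOURCE B (Python) =====
-- def printCoor(u, d, r, l):
--     coordin = []
--     for uu in range(u, d + 1):
--         start = r if (uu + r) % 2 == 0 else r - 1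
--         cnt = (start - l) // 2 + 1
--         for k in range(cnt):
--             rT = start - 2 * k
--             coordin.append([(uu + rT) // 2, (rT - uu) // 2])
--     return coordin
-- ===== Notes on version B (the rewrite author's own statement) =====
-- stated objective: alternative
-- what changed: Instead of scanning every rTemp from r down to l and testing (u+rTemp) parity, B computes per row the first even-parity start value and the exact count of valid points, then emits them directly with a branch-free stride-2 enumeration.
import Mathlib
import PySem

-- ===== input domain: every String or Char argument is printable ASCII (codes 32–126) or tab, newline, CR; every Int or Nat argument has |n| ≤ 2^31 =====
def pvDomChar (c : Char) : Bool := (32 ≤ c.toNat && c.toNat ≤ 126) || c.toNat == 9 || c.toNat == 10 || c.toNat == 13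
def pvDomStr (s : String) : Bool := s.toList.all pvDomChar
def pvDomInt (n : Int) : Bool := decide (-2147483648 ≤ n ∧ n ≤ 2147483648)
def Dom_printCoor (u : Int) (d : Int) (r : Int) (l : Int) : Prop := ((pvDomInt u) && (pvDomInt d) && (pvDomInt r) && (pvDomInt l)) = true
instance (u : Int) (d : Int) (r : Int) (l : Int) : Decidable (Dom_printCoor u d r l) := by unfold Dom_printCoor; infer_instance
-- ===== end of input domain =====

-- B replaces A's per-rTemp parity-tested scan with a branch-free stride-2 enumeration of each
-- row's even-parity points (computed start value and exact count): an alternative decomposition.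

-- ===== PORT A =====
def printCoor (u : Int) (d : Int) (r : Int) (l : Int) : List (List Int) :=
  let res :=
    (PySem.List.pyRange 0 (d - u + 1) 1).foldl
      (fun (st : List (List Int) × Int) _ =>
        let inner :=
          (PySem.List.pyRange 0 (r - l + 1) 1).foldl
            (fun (st2 : List (List Int) × Int) _ =>
              let cUp := [PySem.Int.floordiv (st.2 + st2.2) 2, PySem.Int.floordiv (st2.2 - st.2) 2]
              ((if PySem.Int.mod (st.2 + st2.2) 2 = 0 then st2.1 ++ [cUp] else st2.1), st2.2 - 1))
            (st.1, r)
        (inner.1, st.2 + 1))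
      ([], u)
  res.1

-- ===== PORT B =====
def printCoor_alt (u : Int) (d : Int) (r : Int) (l : Int) : List (List Int) :=
  (PySem.List.pyRange u (d + 1) 1).foldl
    (fun coordin uu =>
      let start := if PySem.Int.mod (uu + r) 2 = 0 then r else r - 1
      let cnt := PySem.Int.floordiv (start - l) 2 + 1
      (PySem.List.pyRange 0 cnt 1).foldl
        (fun c k =>
          let rT := start - 2 * k
          c ++ [[PySem.Int.floordiv (uu + rT) 2, PySem.Int.floordiv (rT - uu) 2]])
        coordin)
    []

-- ===== PRECONDITION & SPEC =====
def Spec_printCoor (u : Int) (d : Int) (r : Int) (l : Int) (out : List (List Int)) : Prop := out = printCoor_alt u d r l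
instance (u : Int) (d : Int) (r : Int) (l : Int) (out : List (List Int)) : Decidable (Spec_printCoor u d r l out) := by unfold Spec_printCoor; infer_instance

-- ===== CLAIM (what is proved, stated in full; the proofs are below) =====
def Claim_equal_printCoor : Prop := ∀ (u : Int) (d : Int) (r : Int) (l : Int), Dom_printCoor u d r l → Spec_printCoor u d r l (printCoor u d r l)

-- ===== LEMMAS AND PROOFS =====
def pvPt (u rT : Int) : List Int :=
  [PySem.Int.floordiv (u + rT) 2, PySem.Int.floordiv (rT - u) 2]
def pvEvens (u : Int) : Int → Nat → List (List Int)
  | _, 0 => []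
  | rT, n+1 => (if PySem.Int.mod (u + rT) 2 = 0 then [pvPt u rT] else []) ++ pvEvens u (rT - 1) n
def pvRow (u start : Int) (m : Nat) : List (List Int) :=
  (List.range m).map (fun (k : Nat) => pvPt u (start - 2 * (k : Int)))

lemma pvEvens_succ (u rT : Int) (n : Nat) :
    pvEvens u rT (n+1) = (if (u + rT) % 2 = 0 then [pvPt u rT] else []) ++ pvEvens u (rT - 1) n := by
  rw [pvEvens, PySem.Int.mod_eq_emod_of_pos (show (0:Int) < 2 by norm_num)]

lemma pvRow_succ (u s : Int) (m : Nat) :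
    pvRow u s (m+1) = pvPt u s :: pvRow u (s-2) m := by
  rw [pvRow, pvRow, List.range_succ_eq_map, List.map_cons, List.map_map]
  congr 1
  · norm_num
  · apply List.map_congr_left
    intro k _
    simp only [Function.comp_apply]
    congr 1
    push_cast
    ring

lemma pvEvens_eq_row (u : Int) : ∀ (n : Nat) (rT : Int),
    pvEvens u rT n =
      pvRow u (if (u + rT) % 2 = 0 then rT else rT - 1)
        (if (u + rT) % 2 = 0 then (n + 1) / 2 else n / 2) := by
  intro n
  induction n with
  | zero => intro rT; simp [pvEvens, pvRow]
  | succ n ih =>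
      intro rT
      rw [pvEvens_succ, ih (rT - 1)]
      by_cases h : (u + rT) % 2 = 0
      · have h' : ¬ (u + (rT - 1)) % 2 = 0 := by omega
        have hc : (n + 1 + 1) / 2 = n / 2 + 1 := by omega
        rw [if_pos h, if_pos h, if_pos h, if_neg h', if_neg h', hc, pvRow_succ]
        have : rT - 1 - 1 = rT - 2 := by ring
        rw [this]
        rfl
      · have h' : (u + (rT - 1)) % 2 = 0 := by omega
        rw [if_neg h, if_neg h, if_neg h, if_pos h', if_pos h', List.nil_append]

lemma pv_foldl_ignore {α σ : Type} (F : σ → σ) :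
    ∀ (xs : List α) (s : σ), xs.foldl (fun a _ => F a) s = F^[xs.length] s := by
  intro xs
  induction xs with
  | nil => intro s; rfl
  | cons x xs ih =>
      intro s
      simp [List.foldl_cons, ih, Function.iterate_succ_apply]

lemma pv_innerA (u : Int) :
    ∀ (n : Nat) (rT : Int) (acc : List (List Int)),
    (fun (st2 : List (List Int) × Int) =>
        ((if PySem.Int.mod (u + st2.2) 2 = 0 then
            st2.1 ++ [[PySem.Int.floordiv (u + st2.2) 2, PySem.Int.floordiv (st2.2 - u) 2]]
          else st2.1), st2.2 - 1))^[n] (acc, rT)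
      = (acc ++ pvEvens u rT n, rT - n) := by
  intro n
  induction n with
  | zero => intro rT acc; simp [pvEvens]
  | succ n ih =>
      intro rT acc
      rw [Function.iterate_succ_apply]
      show _ = _
      simp only []
      rw [ih]
      rw [pvEvens, PySem.Int.mod_eq_emod_of_pos (show (0:Int) < 2 by norm_num)]
      by_cases h : (u + rT) % 2 = 0
      · rw [if_pos h, if_pos h]
        simp only [Prod.mk.injEq]
        refine ⟨by simp [pvPt, List.append_assoc], by push_cast; ring⟩
      · rw [if_neg h, if_neg h, List.nil_append]
        simp only [Prod.mk.injEq]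
        refine ⟨trivial, by push_cast; ring⟩

lemma pv_innerB (u start cnt : Int) (acc : List (List Int)) :
    (PySem.List.pyRange 0 cnt 1).foldl
      (fun c k => c ++ [[PySem.Int.floordiv (u + (start - 2 * k)) 2,
                         PySem.Int.floordiv ((start - 2 * k) - u) 2]]) acc
      = acc ++ pvRow u start cnt.toNat := by
  rw [PySem.List.foldl_append_singleton_eq_map, PySem.List.pyRange_one, List.map_map, pvRow]
  congr 1
  rw [show (cnt - 0).toNat = cnt.toNat by omega]
  apply List.map_congr_left
  intro k _
  simp [pvPt, Function.comp]

lemma pv_row_eq (uu r l : Int) :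
    pvEvens uu r ((r - l + 1).toNat) =
      pvRow uu (if PySem.Int.mod (uu + r) 2 = 0 then r else r - 1)
        ((PySem.Int.floordiv ((if PySem.Int.mod (uu + r) 2 = 0 then r else r - 1) - l) 2 + 1).toNat) := by
  rw [pvEvens_eq_row, PySem.Int.mod_eq_emod_of_pos (show (0:Int) < 2 by norm_num)]
  by_cases h : (uu + r) % 2 = 0
  · rw [if_pos h, if_pos h]
    congr 1
    rw [PySem.Int.floordiv_eq_ediv_of_pos (show (0:Int) < 2 by norm_num)]
    omega
  · rw [if_neg h, if_neg h]
    congr 1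
    rw [PySem.Int.floordiv_eq_ediv_of_pos (show (0:Int) < 2 by norm_num)]
    omega

lemma pv_outerA (r l : Int) :
    ∀ (m : Nat) (uC : Int) (acc : List (List Int)),
    (fun (st : List (List Int) × Int) =>
        (((PySem.List.pyRange 0 (r - l + 1) 1).foldl
            (fun (st2 : List (List Int) × Int) _ =>
              ((if PySem.Int.mod (st.2 + st2.2) 2 = 0 then
                  st2.1 ++ [[PySem.Int.floordiv (st.2 + st2.2) 2, PySem.Int.floordiv (st2.2 - st.2) 2]]
                else st2.1), st2.2 - 1))
            (st.1, r)).1, st.2 + 1))^[m] (acc, uC)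
      = (acc ++ (PySem.List.pyRange uC (uC + m) 1).flatMap
            (fun uu => pvEvens uu r ((r - l + 1).toNat)), uC + m) := by
  intro m
  induction m with
  | zero =>
      intro uC acc
      rw [show PySem.List.pyRange uC (uC + ((0:Nat):Int)) 1 = [] from
        PySem.List.pyRange_one_eq_nil (by push_cast; omega)]
      simp
  | succ m ih =>
      intro uC acc
      rw [Function.iterate_succ_apply]
      show _ = _
      simp only []
      rw [pv_foldl_ignore
            (fun (st2 : List (List Int) × Int) =>
              ((if PySem.Int.mod (uC + st2.2) 2 = 0 then
                  st2.1 ++ [[PySem.Int.floordiv (uC + st2.2) 2, PySem.Int.floordiv (st2.2 - uC) 2]]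
                else st2.1), st2.2 - 1)),
          PySem.List.length_pyRange_one, pv_innerA, ih]
      rw [show (r - l + 1 - 0).toNat = (r - l + 1).toNat by omega]
      rw [show PySem.List.pyRange uC (uC + ((m+1 : Nat) : Int)) 1
            = uC :: PySem.List.pyRange (uC + 1) (uC + 1 + ((m : Nat) : Int)) 1 from by
        rw [PySem.List.pyRange_one_cons (by push_cast; omega)]
        congr 2
        push_cast
        omega]
      simp only [List.flatMap_cons, List.append_assoc, Prod.mk.injEq]
      refine ⟨trivial, by push_cast; omega⟩

-- ===== VERDICT (by name: the statement is the Claim_ definition above) =====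
theorem printCoor_spec : Claim_equal_printCoor := by
  unfold Claim_equal_printCoor Spec_printCoor
  intro u d r l _
  unfold printCoor printCoor_alt
  rw [pv_foldl_ignore
      (fun (st : List (List Int) × Int) =>
        (((PySem.List.pyRange 0 (r - l + 1) 1).foldl
            (fun (st2 : List (List Int) × Int) _ =>
              ((if PySem.Int.mod (st.2 + st2.2) 2 = 0 then
                  st2.1 ++ [[PySem.Int.floordiv (st.2 + st2.2) 2, PySem.Int.floordiv (st2.2 - st.2) 2]]
                else st2.1), st2.2 - 1))
            (st.1, r)).1, st.2 + 1)),
     PySem.List.length_pyRange_one, pv_outerA]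
  have hbody : (fun (coordin : List (List Int)) (uu : Int) =>
      let start := if PySem.Int.mod (uu + r) 2 = 0 then r else r - 1
      let cnt := PySem.Int.floordiv (start - l) 2 + 1
      (PySem.List.pyRange 0 cnt 1).foldl
        (fun c k =>
          let rT := start - 2 * k
          c ++ [[PySem.Int.floordiv (uu + rT) 2, PySem.Int.floordiv (rT - uu) 2]])
        coordin)
      = fun coordin uu => coordin ++ pvEvens uu r ((r - l + 1).toNat) := by
    funext coordin uu
    show (PySem.List.pyRange 0 (PySem.Int.floordiv ((if PySem.Int.mod (uu + r) 2 = 0 then r else r - 1) - l) 2 + 1) 1).foldl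
        (fun c k => c ++ [[PySem.Int.floordiv (uu + ((if PySem.Int.mod (uu + r) 2 = 0 then r else r - 1) - 2 * k)) 2,
                           PySem.Int.floordiv (((if PySem.Int.mod (uu + r) 2 = 0 then r else r - 1) - 2 * k) - uu) 2]])
        coordin = _
    rw [pv_innerB, pv_row_eq]
  rw [hbody, PySem.List.foldl_append_eq_flatMap]
  have hr : PySem.List.pyRange u (u + (((d - u + 1 - 0).toNat : Nat) : Int)) 1 = PySem.List.pyRange u (d + 1) 1 := by
    rw [PySem.List.pyRange_one, PySem.List.pyRange_one]
    congr 2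
    omega
  rw [← hr]
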